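-- pv_equiv track=rewrite | github.com/WithHades/banfoStyle | utils.py | decodeBaiduImg
-- ===== SOURCE A (Python) =====
-- def decodeBaiduImg(objUrl: str) -> str:
--     """
--     百度图片地址解码函数
--     :param objUrl: 编码的url
--     :return: 解码的url
--     """
--     res = ''
--     c = ['_z2C$q', '_z&e3B', 'AzdH3F']
--     d = {'w': 'a',
--          'k': 'b',
--          'v': 'c',
--          '1': 'd',
--          'j': 'e',
--          'u': 'f',
--          '2': 'g',
--          'i': 'h',
--          't': 'i',
--          '3': 'j',
--          'h': 'k',
--          's': 'l',
--          '4': 'm',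
--          'g': 'n',
--          '5': 'o',
--          'r': 'p',
--          'q': 'q',
--          '6': 'r',
--          'f': 's',
--          'p': 't',
--          '7': 'u',
--          'e': 'v',
--          'o': 'w',
--          '8': '1',
--          'd': '2',
--          'n': '3',
--          '9': '4',
--          'c': '5',
--          'm': '6',
--          '0': '7',
--          'b': '8',
--          'l': '9',
--          'a': '0',
--          '_z2C$q': ':',
--          '_z&e3B': '.',
--          'AzdH3F': '/'}
--     for m in c:
--         objUrl = objUrl.replace(m, d[m])
--     for char in objUrl:
--         char = d[char] if char in d else char
--         res = res + char
--     return res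
-- ===== SOURCE B (Python) =====
-- _CHARS = {'w': 'a', 'k': 'b', 'v': 'c', '1': 'd', 'j': 'e', 'u': 'f', '2': 'g',
--           'i': 'h', 't': 'i', '3': 'j', 'h': 'k', 's': 'l', '4': 'm', 'g': 'n',
--           '5': 'o', 'r': 'p', 'q': 'q', '6': 'r', 'f': 's', 'p': 't', '7': 'u',
--           'e': 'v', 'o': 'w', '8': '1', 'd': '2', 'n': '3', '9': '4', 'c': '5',
--           'm': '6', '0': '7', 'b': '8', 'l': '9', 'a': '0'}
--
--
-- def decodeBaiduImg(objUrl: str) -> str: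
--     """Single left-to-right scan: greedy 6-char token match, else per-char map."""
--     out = []
--     i = 0
--     n = len(objUrl)
--     while i < n:
--         chunk = objUrl[i:i + 6]
--         if chunk == '_z2C$q':
--             out.append(':')
--             i += 6
--         elif chunk == '_z&e3B':
--             out.append('.')
--             i += 6
--         elif chunk == 'AzdH3F':
--             out.append('/')
--             i += 6
--         else:
--             ch = objUrl[i]
--             out.append(_CHARS.get(ch, ch))
--             i += 1
--     return ''.join(out)
-- ===== Notes on version B (the rewrite author's own statement) =====
-- stated objective: alternative
-- what changed: Replaced the four whole-string passes (three sequential .replace calls plus a per-char rebuild) by one left-to-right scan with a moving index that greedily matches the three 6-char tokens and otherwise maps a single character.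
import Mathlib
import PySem

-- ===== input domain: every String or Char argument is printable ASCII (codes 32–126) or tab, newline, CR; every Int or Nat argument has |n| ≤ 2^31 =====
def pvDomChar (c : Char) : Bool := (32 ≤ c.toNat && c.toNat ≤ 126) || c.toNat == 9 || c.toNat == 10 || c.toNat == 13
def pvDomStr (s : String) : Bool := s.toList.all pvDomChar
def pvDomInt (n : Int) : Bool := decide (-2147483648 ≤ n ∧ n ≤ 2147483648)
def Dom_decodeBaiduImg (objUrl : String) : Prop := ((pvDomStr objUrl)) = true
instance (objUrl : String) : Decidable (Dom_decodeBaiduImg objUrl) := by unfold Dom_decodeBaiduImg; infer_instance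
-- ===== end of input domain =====

-- B replaces A's four whole-string passes (three sequential .replace calls then a per-char rebuild)
-- by one left-to-right scan that greedily matches a 6-char token or maps one character (objective: alternative).

-- ===== PORT A =====
-- the dict d of A (char substitutions then the three token entries, in A's order)
def pvDictA : PySem.Dict String String := PySem.Dict.mk
  [("w", "a"), ("k", "b"), ("v", "c"), ("1", "d"), ("j", "e"), ("u", "f"), ("2", "g"), ("i", "h"), ("t", "i"), ("3", "j"), ("h", "k"), ("s", "l"), ("4", "m"), ("g", "n"), ("5", "o"), ("r", "p"), ("q", "q"), ("6", "r"), ("f", "s"), ("p", "t"), ("7", "u"), ("e", "v"), ("o", "w"), ("8", "1"), ("d", "2"), ("n", "3"), ("9", "4"), ("c", "5"), ("m", "6"), ("0", "7"), ("b", "8"), ("l", "9"), ("a", "0"), ("_z2C$q", ":"), ("_z&e3B", "."), ("AzdH3F", "/")]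

def decodeBaiduImg (objUrl : String) : String :=
  -- for m in c: objUrl = objUrl.replace(m, d[m])
  let u := ["_z2C$q", "_z&e3B", "AzdH3F"].foldl
    (fun s m => PySem.Str.replace s m ((pvDictA.get? m).getD "")) objUrl
  -- for char in objUrl: res = res + (d[char] if char in d else char)
  u.toList.foldl
    (fun res ch => res ++ ((pvDictA.get? (String.ofList [ch])).getD (String.ofList [ch]))) ""

-- ===== PORT B =====
-- B's _CHARS table (single-character substitutions only)
def pvCharMap : PySem.Dict Char Char := PySem.Dict.mk
  [('w', 'a'), ('k', 'b'), ('v', 'c'), ('1', 'd'), ('j', 'e'), ('u', 'f'), ('2', 'g'), ('i', 'h'), ('t', 'i'), ('3', 'j'), ('h', 'k'), ('s', 'l'), ('4', 'm'), ('g', 'n'), ('5', 'o'), ('r', 'p'), ('q', 'q'), ('6', 'r'), ('f', 's'), ('p', 't'), ('7', 'u'), ('e', 'v'), ('o', 'w'), ('8', '1'), ('d', '2'), ('n', '3'), ('9', '4'), ('c', '5'), ('m', '6'), ('0', '7'), ('b', '8'), ('l', '9'), ('a', '0')]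

-- B's while loop over the index i, as recursion on the remaining characters;
-- objUrl[i:i+6] == tok becomes (remaining).take 6 = tok
def pvScan : List Char → List Char
  | [] => []
  | c :: xs =>
    if (c :: xs).take 6 = ['_', 'z', '2', 'C', '$', 'q'] then ':' :: pvScan ((c :: xs).drop 6)
    else if (c :: xs).take 6 = ['_', 'z', '&', 'e', '3', 'B'] then '.' :: pvScan ((c :: xs).drop 6)
    else if (c :: xs).take 6 = ['A', 'z', 'd', 'H', '3', 'F'] then '/' :: pvScan ((c :: xs).drop 6)
    else (pvCharMap.get? c).getD c :: pvScan xs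
termination_by l => l.length
decreasing_by all_goals simp

def decodeBaiduImg_alt (objUrl : String) : String := String.ofList (pvScan objUrl.toList)

-- ===== PRECONDITION & SPEC =====
def Spec_decodeBaiduImg (objUrl : String) (out : String) : Prop := out = decodeBaiduImg_alt objUrl
instance (objUrl : String) (out : String) : Decidable (Spec_decodeBaiduImg objUrl out) := by unfold Spec_decodeBaiduImg; infer_instance

-- ===== CLAIM (what is proved, stated in full; the proofs are below) =====
def Claim_equal_decodeBaiduImg : Prop := ∀ (objUrl : String), Dom_decodeBaiduImg objUrl → Spec_decodeBaiduImg objUrl (decodeBaiduImg objUrl)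

-- ===== LEMMAS AND PROOFS =====

-- structural model of Python str.replace (for a nonempty pattern)
def pvRep (old new : List Char) : List Char → List Char
  | [] => []
  | c :: t =>
    if old.isPrefixOf (c :: t) && !old.isEmpty then
      new ++ pvRep old new ((c :: t).drop old.length)
    else c :: pvRep old new t
termination_by l => l.length
decreasing_by
  · simp only [List.length_drop, List.length_cons]
    rename_i hgd
    simp only [Bool.and_eq_true, Bool.not_eq_eq_eq_not, Bool.not_true, List.isEmpty_eq_false_iff]  at hgd
    have : old.length ≠ 0 := by
      intro h0; exact hgd.2 (List.eq_nil_of_length_eq_zero h0)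
    omega
  · simp

theorem pvRep_nil (old new : List Char) : pvRep old new [] = [] := by simp [pvRep]

theorem pvRep_pos (old new l : List Char) (ho : old ≠ []) (h : old <+: l) :
    pvRep old new l = new ++ pvRep old new (l.drop old.length) := by
  match l with
  | [] => exact absurd (List.prefix_nil.mp h) ho
  | c :: t =>
    rw [pvRep]
    rw [if_pos]
    simp [List.isPrefixOf_iff_prefix, h, ho]

theorem pvRep_neg (old new : List Char) (c : Char) (t : List Char) (h : ¬ old <+: (c :: t)) :
    pvRep old new (c :: t) = c :: pvRep old new t := by
  rw [pvRep, if_neg]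
  simp [List.isPrefixOf_iff_prefix, h]

-- replace.go with enough fuel computes pvRep
theorem pvGo_spec (old new : List Char) (ho : old ≠ []) :
    ∀ (fuel : Nat) (l acc : List Char), l.length ≤ fuel →
      PySem.Chars.replace.go old new fuel l acc = acc.reverse ++ pvRep old new l := by
  intro fuel
  induction fuel with
  | zero =>
    intro l acc h
    have : l = [] := List.eq_nil_of_length_eq_zero (Nat.le_zero.mp h)
    subst this
    simp [PySem.Chars.replace.go, pvRep_nil]
  | succ n ih =>
    intro l acc h
    match l with
    | [] => simp [PySem.Chars.replace.go, pvRep_nil]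
    | c :: t =>
      rw [PySem.Chars.replace.go]
      by_cases hp : old.isPrefixOf (c :: t)
      · rw [if_pos hp]
        have hpre : old <+: (c :: t) := List.isPrefixOf_iff_prefix.mp hp
        have hlen : old.length ≤ (c :: t).length := hpre.length_le
        rw [ih _ _ (by
          have hop := List.length_pos_of_ne_nil ho
          simp only [List.length_drop]
          simp only [List.length_cons] at h hlen ⊢
          omega)]
        rw [pvRep_pos old new _ ho hpre]
        simp
      · rw [if_neg hp]
        rw [ih _ _ (by simp only [List.length_cons] at h ⊢; omega)]
        rw [pvRep_neg old new c t (fun hc => hp (List.isPrefixOf_iff_prefix.mpr hc))]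
        simp

theorem replace_eq_pvRep (s old new : List Char) (ho : old ≠ []) :
    PySem.Chars.replace s old new = pvRep old new s := by
  rw [PySem.Chars.replace, if_neg (by simp [ho])]
  rw [pvGo_spec old new ho s.length s [] (le_refl _)]
  simp

-- replacing a token by a char not occurring in p creates no new prefix p
theorem pvRep_no_new_prefix (old : List Char) (v : Char) (ho : old ≠ []) :
    ∀ (p : List Char), v ∉ p → ∀ (s : List Char), p <+: pvRep old [v] s → p <+: s := by
  intro p
  induction p with
  | nil => intro _ s _; exact List.nil_prefix
  | cons a p' ih =>
    intro hv s hpre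
    match s with
    | [] => rw [pvRep_nil] at hpre; exact absurd (List.prefix_nil.mp hpre) (by simp)
    | c :: t =>
      by_cases hp : old <+: (c :: t)
      · rw [pvRep_pos old [v] _ ho hp] at hpre
        have : a = v := (List.cons_prefix_cons.mp hpre).1
        exact absurd (this ▸ List.mem_cons_self) hv
      · rw [pvRep_neg old [v] c t hp] at hpre
        obtain ⟨hac, hp'⟩ := List.cons_prefix_cons.mp hpre
        exact List.cons_prefix_cons.mpr ⟨hac, ih (fun hm => hv (List.mem_cons_of_mem a hm)) t hp'⟩

-- A's per-character lookup, on the list side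
def pvGl (c : Char) : List Char :=
  ((pvDictA.get? (String.ofList [c])).getD (String.ofList [c])).toList

theorem strSingleEq (a c : Char) : (String.ofList [a] = String.ofList [c]) ↔ a = c := by
  rw [String.ofList_inj]; simp

theorem strTokNe (a b d e f g c : Char) : (String.ofList [a, b, d, e, f, g] = String.ofList [c]) ↔ False := by
  rw [String.ofList_inj]; simp

-- A's single-character lookup agrees with B's _CHARS table
set_option maxHeartbeats 1600000 in
theorem pvGl_eq (c : Char) : pvGl c = [(pvCharMap.get? c).getD c] := by
  by_cases hc0 : 'w' = c
  · subst hc0; rfl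
  by_cases hc1 : 'k' = c
  · subst hc1; rfl
  by_cases hc2 : 'v' = c
  · subst hc2; rfl
  by_cases hc3 : '1' = c
  · subst hc3; rfl
  by_cases hc4 : 'j' = c
  · subst hc4; rfl
  by_cases hc5 : 'u' = c
  · subst hc5; rfl
  by_cases hc6 : '2' = c
  · subst hc6; rfl
  by_cases hc7 : 'i' = c
  · subst hc7; rfl
  by_cases hc8 : 't' = c
  · subst hc8; rfl
  by_cases hc9 : '3' = c
  · subst hc9; rfl
  by_cases hc10 : 'h' = c
  · subst hc10; rfl
  by_cases hc11 : 's' = c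
  · subst hc11; rfl
  by_cases hc12 : '4' = c
  · subst hc12; rfl
  by_cases hc13 : 'g' = c
  · subst hc13; rfl
  by_cases hc14 : '5' = c
  · subst hc14; rfl
  by_cases hc15 : 'r' = c
  · subst hc15; rfl
  by_cases hc16 : 'q' = c
  · subst hc16; rfl
  by_cases hc17 : '6' = c
  · subst hc17; rfl
  by_cases hc18 : 'f' = c
  · subst hc18; rfl
  by_cases hc19 : 'p' = c
  · subst hc19; rfl
  by_cases hc20 : '7' = c
  · subst hc20; rfl
  by_cases hc21 : 'e' = c
  · subst hc21; rfl
  by_cases hc22 : 'o' = c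
  · subst hc22; rfl
  by_cases hc23 : '8' = c
  · subst hc23; rfl
  by_cases hc24 : 'd' = c
  · subst hc24; rfl
  by_cases hc25 : 'n' = c
  · subst hc25; rfl
  by_cases hc26 : '9' = c
  · subst hc26; rfl
  by_cases hc27 : 'c' = c
  · subst hc27; rfl
  by_cases hc28 : 'm' = c
  · subst hc28; rfl
  by_cases hc29 : '0' = c
  · subst hc29; rfl
  by_cases hc30 : 'b' = c
  · subst hc30; rfl
  by_cases hc31 : 'l' = c
  · subst hc31; rfl
  by_cases hc32 : 'a' = c
  · subst hc32; rfl
  have h0 : ("w" : String) = String.ofList ['w'] := rfl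
  have h1 : ("k" : String) = String.ofList ['k'] := rfl
  have h2 : ("v" : String) = String.ofList ['v'] := rfl
  have h3 : ("1" : String) = String.ofList ['1'] := rfl
  have h4 : ("j" : String) = String.ofList ['j'] := rfl
  have h5 : ("u" : String) = String.ofList ['u'] := rfl
  have h6 : ("2" : String) = String.ofList ['2'] := rfl
  have h7 : ("i" : String) = String.ofList ['i'] := rfl
  have h8 : ("t" : String) = String.ofList ['t'] := rfl
  have h9 : ("3" : String) = String.ofList ['3'] := rfl
  have h10 : ("h" : String) = String.ofList ['h'] := rfl
  have h11 : ("s" : String) = String.ofList ['s'] := rfl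
  have h12 : ("4" : String) = String.ofList ['4'] := rfl
  have h13 : ("g" : String) = String.ofList ['g'] := rfl
  have h14 : ("5" : String) = String.ofList ['5'] := rfl
  have h15 : ("r" : String) = String.ofList ['r'] := rfl
  have h16 : ("q" : String) = String.ofList ['q'] := rfl
  have h17 : ("6" : String) = String.ofList ['6'] := rfl
  have h18 : ("f" : String) = String.ofList ['f'] := rfl
  have h19 : ("p" : String) = String.ofList ['p'] := rfl
  have h20 : ("7" : String) = String.ofList ['7'] := rfl
  have h21 : ("e" : String) = String.ofList ['e'] := rfl
  have h22 : ("o" : String) = String.ofList ['o'] := rfl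
  have h23 : ("8" : String) = String.ofList ['8'] := rfl
  have h24 : ("d" : String) = String.ofList ['d'] := rfl
  have h25 : ("n" : String) = String.ofList ['n'] := rfl
  have h26 : ("9" : String) = String.ofList ['9'] := rfl
  have h27 : ("c" : String) = String.ofList ['c'] := rfl
  have h28 : ("m" : String) = String.ofList ['m'] := rfl
  have h29 : ("0" : String) = String.ofList ['0'] := rfl
  have h30 : ("b" : String) = String.ofList ['b'] := rfl
  have h31 : ("l" : String) = String.ofList ['l'] := rfl
  have h32 : ("a" : String) = String.ofList ['a'] := rfl
  have ht0 : ("_z2C$q" : String) = String.ofList ['_', 'z', '2', 'C', '$', 'q'] := rfl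
  have ht1 : ("_z&e3B" : String) = String.ofList ['_', 'z', '&', 'e', '3', 'B'] := rfl
  have ht2 : ("AzdH3F" : String) = String.ofList ['A', 'z', 'd', 'H', '3', 'F'] := rfl
  simp only [pvGl, pvDictA, pvCharMap, PySem.Dict.get?_mk_cons, beq_iff_eq,
    h0, h1, h2, h3, h4, h5, h6, h7, h8, h9, h10, h11, h12, h13, h14, h15, h16, h17, h18, h19, h20, h21, h22, h23, h24, h25, h26, h27, h28, h29, h30, h31, h32, ht0, ht1, ht2,
    strSingleEq, strTokNe, if_false]
  simp only [if_neg hc0, if_neg hc1, if_neg hc2, if_neg hc3, if_neg hc4, if_neg hc5, if_neg hc6, if_neg hc7, if_neg hc8, if_neg hc9, if_neg hc10, if_neg hc11, if_neg hc12, if_neg hc13, if_neg hc14, if_neg hc15, if_neg hc16, if_neg hc17, if_neg hc18, if_neg hc19, if_neg hc20, if_neg hc21, if_neg hc22, if_neg hc23, if_neg hc24, if_neg hc25, if_neg hc26, if_neg hc27, if_neg hc28, if_neg hc29, if_neg hc30, if_neg hc31, if_neg hc32]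
  simp [PySem.Dict.get?]

-- A's string-accumulating fold, on the list side
theorem pvFoldA (f : Char → String) (l : List Char) (r : String) :
    (l.foldl (fun res ch => res ++ f ch) r).toList = r.toList ++ l.flatMap (fun c => (f c).toList) := by
  induction l generalizing r with
  | nil => simp
  | cons c t ih => simp [List.foldl_cons, ih]

-- the three tokens (list side) and their non-emptiness
theorem pvT1_ne : (['_', 'z', '2', 'C', '$', 'q'] : List Char) ≠ [] := by simp
theorem pvT2_ne : (['_', 'z', '&', 'e', '3', 'B'] : List Char) ≠ [] := by simp
theorem pvT3_ne : (['A', 'z', 'd', 'H', '3', 'F'] : List Char) ≠ [] := by simp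

-- main lemma: A's four passes equal B's single scan
theorem pvMain : ∀ (n : Nat) (s : List Char), s.length ≤ n →
    (pvRep ['A', 'z', 'd', 'H', '3', 'F'] ['/']
      (pvRep ['_', 'z', '&', 'e', '3', 'B'] ['.']
        (pvRep ['_', 'z', '2', 'C', '$', 'q'] [':'] s))).flatMap pvGl = pvScan s := by
  intro n
  induction n with
  | zero =>
    intro s h
    have : s = [] := List.eq_nil_of_length_eq_zero (Nat.le_zero.mp h)
    subst this
    simp [pvRep_nil, pvScan]
  | succ n ih =>
    intro s hlen
    match s with
    | [] => simp [pvRep_nil, pvScan]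
    | c :: xs =>
      by_cases ha1 : ['_', 'z', '2', 'C', '$', 'q'] <+: (c :: xs)
      · -- token 1 at the front
        have htake : (c :: xs).take 6 = ['_', 'z', '2', 'C', '$', 'q'] := by
          have := List.prefix_iff_eq_take.mp ha1
          simpa using this.symm
        obtain ⟨u, hu⟩ := ha1
        have hu6 : u.length ≤ n := by
          have h2 := congrArg List.length hu
          simp only [List.length_append, List.length_cons] at h2 hlen
          simp at h2
          omega
        rw [pvScan, if_pos htake, ← hu]
        have hdrop : (['_', 'z', '2', 'C', '$', 'q'] ++ u).drop 6 = u := by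
          simp
        rw [hdrop]
        have e1 : pvRep ['_', 'z', '2', 'C', '$', 'q'] [':'] (['_', 'z', '2', 'C', '$', 'q'] ++ u)
            = ':' :: pvRep ['_', 'z', '2', 'C', '$', 'q'] [':'] u := by
          rw [pvRep_pos _ _ _ pvT1_ne (List.prefix_append _ _)]
          have : (['_', 'z', '2', 'C', '$', 'q'] ++ u).drop (['_', 'z', '2', 'C', '$', 'q'] : List Char).length = u := by
            simp
          rw [this]
          rfl
        rw [e1]
        rw [pvRep_neg _ _ _ _ (by simp [List.cons_prefix_cons])]
        rw [pvRep_neg _ _ _ _ (by simp [List.cons_prefix_cons])]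
        rw [List.flatMap_cons, show pvGl ':' = [':'] from by rw [pvGl_eq]; rfl]
        rw [ih u hu6]
        rfl
      · by_cases ha2 : ['_', 'z', '&', 'e', '3', 'B'] <+: (c :: xs)
        · -- token 2 at the front
          have htake : (c :: xs).take 6 = ['_', 'z', '&', 'e', '3', 'B'] := by
            have := List.prefix_iff_eq_take.mp ha2
            simpa using this.symm
          have hnt1 : ¬ (c :: xs).take 6 = ['_', 'z', '2', 'C', '$', 'q'] := by
            intro htk
            exact ha1 (by rw [List.prefix_iff_eq_take]; simpa using htk.symm)
          obtain ⟨u, hu⟩ := ha2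
          have hu6 : u.length ≤ n := by
            have h2 := congrArg List.length hu
            simp only [List.length_append, List.length_cons] at h2 hlen
            simp at h2
            omega
          have ha1' : ¬ ['_', 'z', '2', 'C', '$', 'q'] <+: ('_' :: 'z' :: '&' :: 'e' :: '3' :: 'B' :: u) := by
            rw [show ('_' :: 'z' :: '&' :: 'e' :: '3' :: 'B' :: u : List Char)
              = ['_', 'z', '&', 'e', '3', 'B'] ++ u from rfl, hu]
            exact ha1
          rw [pvScan, if_neg hnt1, if_pos htake, ← hu]
          have hdrop : (['_', 'z', '&', 'e', '3', 'B'] ++ u).drop 6 = u := by simp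
          rw [hdrop]
          have e1 : pvRep ['_', 'z', '2', 'C', '$', 'q'] [':'] (['_', 'z', '&', 'e', '3', 'B'] ++ u)
              = ['_', 'z', '&', 'e', '3', 'B'] ++ pvRep ['_', 'z', '2', 'C', '$', 'q'] [':'] u := by
            rw [show (['_', 'z', '&', 'e', '3', 'B'] ++ u : List Char)
              = '_' :: 'z' :: '&' :: 'e' :: '3' :: 'B' :: u from rfl]
            rw [pvRep_neg _ _ _ _ ha1']
            rw [pvRep_neg _ _ _ _ (by simp [List.cons_prefix_cons])]
            rw [pvRep_neg _ _ _ _ (by simp [List.cons_prefix_cons])]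
            rw [pvRep_neg _ _ _ _ (by simp [List.cons_prefix_cons])]
            rw [pvRep_neg _ _ _ _ (by simp [List.cons_prefix_cons])]
            rw [pvRep_neg _ _ _ _ (by simp [List.cons_prefix_cons])]
            rfl
          rw [e1]
          have e2 : pvRep ['_', 'z', '&', 'e', '3', 'B'] ['.']
                (['_', 'z', '&', 'e', '3', 'B'] ++ pvRep ['_', 'z', '2', 'C', '$', 'q'] [':'] u)
              = '.' :: pvRep ['_', 'z', '&', 'e', '3', 'B'] ['.'] (pvRep ['_', 'z', '2', 'C', '$', 'q'] [':'] u) := by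
            rw [pvRep_pos _ _ _ pvT2_ne (List.prefix_append _ _)]
            have : (['_', 'z', '&', 'e', '3', 'B'] ++ pvRep ['_', 'z', '2', 'C', '$', 'q'] [':'] u).drop
                (['_', 'z', '&', 'e', '3', 'B'] : List Char).length = pvRep ['_', 'z', '2', 'C', '$', 'q'] [':'] u := by
              simp
            rw [this]
            rfl
          rw [e2]
          rw [pvRep_neg _ _ _ _ (by simp [List.cons_prefix_cons])]
          rw [List.flatMap_cons, show pvGl '.' = ['.'] from by rw [pvGl_eq]; rfl]
          rw [ih u hu6]
          rfl
        · by_cases ha3 : ['A', 'z', 'd', 'H', '3', 'F'] <+: (c :: xs)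
          · -- token 3 at the front
            have htake : (c :: xs).take 6 = ['A', 'z', 'd', 'H', '3', 'F'] := by
              have := List.prefix_iff_eq_take.mp ha3
              simpa using this.symm
            have hnt1 : ¬ (c :: xs).take 6 = ['_', 'z', '2', 'C', '$', 'q'] := by
              intro htk
              exact ha1 (by rw [List.prefix_iff_eq_take]; simpa using htk.symm)
            have hnt2 : ¬ (c :: xs).take 6 = ['_', 'z', '&', 'e', '3', 'B'] := by
              intro htk
              exact ha2 (by rw [List.prefix_iff_eq_take]; simpa using htk.symm)
            obtain ⟨u, hu⟩ := ha3
            have hu6 : u.length ≤ n := by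
              have h2 := congrArg List.length hu
              simp only [List.length_append, List.length_cons] at h2 hlen
              simp at h2
              omega
            rw [pvScan, if_neg hnt1, if_neg hnt2, if_pos htake, ← hu]
            have hdrop : (['A', 'z', 'd', 'H', '3', 'F'] ++ u).drop 6 = u := by simp
            rw [hdrop]
            have e1 : pvRep ['_', 'z', '2', 'C', '$', 'q'] [':'] (['A', 'z', 'd', 'H', '3', 'F'] ++ u)
                = ['A', 'z', 'd', 'H', '3', 'F'] ++ pvRep ['_', 'z', '2', 'C', '$', 'q'] [':'] u := by
              rw [show (['A', 'z', 'd', 'H', '3', 'F'] ++ u : List Char)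
                = 'A' :: 'z' :: 'd' :: 'H' :: '3' :: 'F' :: u from rfl]
              rw [pvRep_neg _ _ _ _ (by simp [List.cons_prefix_cons])]
              rw [pvRep_neg _ _ _ _ (by simp [List.cons_prefix_cons])]
              rw [pvRep_neg _ _ _ _ (by simp [List.cons_prefix_cons])]
              rw [pvRep_neg _ _ _ _ (by simp [List.cons_prefix_cons])]
              rw [pvRep_neg _ _ _ _ (by simp [List.cons_prefix_cons])]
              rw [pvRep_neg _ _ _ _ (by simp [List.cons_prefix_cons])]
              rfl
            rw [e1]
            have e2 : pvRep ['_', 'z', '&', 'e', '3', 'B'] ['.']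
                  (['A', 'z', 'd', 'H', '3', 'F'] ++ pvRep ['_', 'z', '2', 'C', '$', 'q'] [':'] u)
                = ['A', 'z', 'd', 'H', '3', 'F'] ++ pvRep ['_', 'z', '&', 'e', '3', 'B'] ['.'] (pvRep ['_', 'z', '2', 'C', '$', 'q'] [':'] u) := by
              rw [show (['A', 'z', 'd', 'H', '3', 'F'] ++ pvRep ['_', 'z', '2', 'C', '$', 'q'] [':'] u : List Char)
                = 'A' :: 'z' :: 'd' :: 'H' :: '3' :: 'F' :: pvRep ['_', 'z', '2', 'C', '$', 'q'] [':'] u from rfl]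
              rw [pvRep_neg _ _ _ _ (by simp [List.cons_prefix_cons])]
              rw [pvRep_neg _ _ _ _ (by simp [List.cons_prefix_cons])]
              rw [pvRep_neg _ _ _ _ (by simp [List.cons_prefix_cons])]
              rw [pvRep_neg _ _ _ _ (by simp [List.cons_prefix_cons])]
              rw [pvRep_neg _ _ _ _ (by simp [List.cons_prefix_cons])]
              rw [pvRep_neg _ _ _ _ (by simp [List.cons_prefix_cons])]
              rfl
            rw [e2]
            have e3 : pvRep ['A', 'z', 'd', 'H', '3', 'F'] ['/']
                  (['A', 'z', 'd', 'H', '3', 'F'] ++ pvRep ['_', 'z', '&', 'e', '3', 'B'] ['.'] (pvRep ['_', 'z', '2', 'C', '$', 'q'] [':'] u))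
                = '/' :: pvRep ['A', 'z', 'd', 'H', '3', 'F'] ['/'] (pvRep ['_', 'z', '&', 'e', '3', 'B'] ['.'] (pvRep ['_', 'z', '2', 'C', '$', 'q'] [':'] u)) := by
              rw [pvRep_pos _ _ _ pvT3_ne (List.prefix_append _ _)]
              have : (['A', 'z', 'd', 'H', '3', 'F'] ++ pvRep ['_', 'z', '&', 'e', '3', 'B'] ['.'] (pvRep ['_', 'z', '2', 'C', '$', 'q'] [':'] u)).drop
                  (['A', 'z', 'd', 'H', '3', 'F'] : List Char).length
                  = pvRep ['_', 'z', '&', 'e', '3', 'B'] ['.'] (pvRep ['_', 'z', '2', 'C', '$', 'q'] [':'] u) := by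
                simp
              rw [this]
              rfl
            rw [e3]
            rw [List.flatMap_cons, show pvGl '/' = ['/'] from by rw [pvGl_eq]; rfl]
            rw [ih u hu6]
            rfl
          · -- no token at the front: one character is consumed
            have hnt1 : ¬ (c :: xs).take 6 = ['_', 'z', '2', 'C', '$', 'q'] := by
              intro htk
              exact ha1 (by rw [List.prefix_iff_eq_take]; simpa using htk.symm)
            have hnt2 : ¬ (c :: xs).take 6 = ['_', 'z', '&', 'e', '3', 'B'] := by
              intro htk
              exact ha2 (by rw [List.prefix_iff_eq_take]; simpa using htk.symm)
            have hnt3 : ¬ (c :: xs).take 6 = ['A', 'z', 'd', 'H', '3', 'F'] := by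
              intro htk
              exact ha3 (by rw [List.prefix_iff_eq_take]; simpa using htk.symm)
            rw [pvScan, if_neg hnt1, if_neg hnt2, if_neg hnt3]
            have e1 : pvRep ['_', 'z', '2', 'C', '$', 'q'] [':'] (c :: xs)
                = c :: pvRep ['_', 'z', '2', 'C', '$', 'q'] [':'] xs := pvRep_neg _ _ _ _ ha1
            have hb2 : ¬ ['_', 'z', '&', 'e', '3', 'B'] <+: (c :: pvRep ['_', 'z', '2', 'C', '$', 'q'] [':'] xs) := by
              intro hpre
              rw [← e1] at hpre
              exact ha2 (pvRep_no_new_prefix _ ':' pvT1_ne _ (by decide) _ hpre)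
            have e2 : pvRep ['_', 'z', '&', 'e', '3', 'B'] ['.'] (c :: pvRep ['_', 'z', '2', 'C', '$', 'q'] [':'] xs)
                = c :: pvRep ['_', 'z', '&', 'e', '3', 'B'] ['.'] (pvRep ['_', 'z', '2', 'C', '$', 'q'] [':'] xs) :=
              pvRep_neg _ _ _ _ hb2
            have hb3 : ¬ ['A', 'z', 'd', 'H', '3', 'F'] <+: (c :: pvRep ['_', 'z', '&', 'e', '3', 'B'] ['.'] (pvRep ['_', 'z', '2', 'C', '$', 'q'] [':'] xs)) := by
              intro hpre
              rw [← e2, ← e1] at hpre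
              have h1 := pvRep_no_new_prefix _ '.' pvT2_ne _ (by decide) _ hpre
              have h2 := pvRep_no_new_prefix _ ':' pvT1_ne _ (by decide) _ h1
              exact ha3 h2
            have e3 : pvRep ['A', 'z', 'd', 'H', '3', 'F'] ['/'] (c :: pvRep ['_', 'z', '&', 'e', '3', 'B'] ['.'] (pvRep ['_', 'z', '2', 'C', '$', 'q'] [':'] xs))
                = c :: pvRep ['A', 'z', 'd', 'H', '3', 'F'] ['/'] (pvRep ['_', 'z', '&', 'e', '3', 'B'] ['.'] (pvRep ['_', 'z', '2', 'C', '$', 'q'] [':'] xs)) :=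
              pvRep_neg _ _ _ _ hb3
            rw [e1, e2, e3, List.flatMap_cons, pvGl_eq]
            have hx : xs.length ≤ n := by
              simp only [List.length_cons] at hlen
              omega
            rw [ih xs hx]
            rfl

-- ===== VERDICT (by name: the statement is the Claim_ definition above) =====
theorem decodeBaiduImg_spec : Claim_equal_decodeBaiduImg := by
  intro objUrl _
  unfold Spec_decodeBaiduImg decodeBaiduImg decodeBaiduImg_alt
  simp only [List.foldl_cons, List.foldl_nil]
  rw [show ((pvDictA.get? "_z2C$q").getD "") = ":" from rfl]
  rw [show ((pvDictA.get? "_z&e3B").getD "") = "." from rfl]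
  rw [show ((pvDictA.get? "AzdH3F").getD "") = "/" from rfl]
  apply String.toList_injective
  rw [pvFoldA]
  simp only [PySem.Str.toList_replace, String.toList_ofList]
  rw [show ("_z2C$q" : String).toList = ['_', 'z', '2', 'C', '$', 'q'] from rfl,
    show ("_z&e3B" : String).toList = ['_', 'z', '&', 'e', '3', 'B'] from rfl,
    show ("AzdH3F" : String).toList = ['A', 'z', 'd', 'H', '3', 'F'] from rfl,
    show (":" : String).toList = [':'] from rfl, show ("." : String).toList = ['.'] from rfl,
    show ("/" : String).toList = ['/'] from rfl, show ("" : String).toList = ([] : List Char) from rfl]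
  rw [replace_eq_pvRep _ _ _ pvT1_ne, replace_eq_pvRep _ _ _ pvT2_ne, replace_eq_pvRep _ _ _ pvT3_ne]
  rw [List.nil_append]
  rw [show (fun c => ((pvDictA.get? (String.ofList [c])).getD (String.ofList [c])).toList) = pvGl from rfl]
  exact pvMain _ objUrl.toList (le_refl _)
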